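-- pv_equiv track=rewrite | github.com/nao7sep/pyddle | pyddle_string.py | index_of_any_casefold
-- ===== SOURCE A (Python) =====
-- def equals_at_casefold(str_, index, substring):
--     str_length = len(str_)
--     substring_length = len(substring)
--
--     if index < 0:
--         raise RuntimeError("Index out of range.")
--
--     if substring_length > 0:
--         if index >= str_length:
--             raise RuntimeError("Index out of range.")
--
--     else:
--         if index > str_length:
--             raise RuntimeError("Index out of range.")
--
--         return True
--
--     if index + substring_length > len(str_):
--         return False
--
--     return str_[index : index + substring_length].casefold() == substring.casefold()
--
-- def index_of_any_casefold(str_, substrings):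
--     str_length = len(str_)
--
--     for substring in substrings:
--         if substring is None:
--             raise RuntimeError("None is not a valid substring.")
--
--         if substring == "":
--             return 0
--
--     for index in range(str_length):
--         for substring in substrings:
--             if equals_at_casefold(str_, index, substring):
--                 return index
--
--     return -1
-- ===== SOURCE B (Python) =====
-- def index_of_any_casefold(str_, substrings):
--     for substring in substrings:
--         if substring is None:
--             raise RuntimeError("None is not a valid substring.")
--
--         if substring == "":
--             return 0
--
--     folded = str_.casefold()
--     best = -1
--
--     for substring in substrings:
--         found = folded.find(substring.casefold())
--
--         if found >= 0 and (best == -1 or found < best):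
--             best = found
--
--     return best
-- ===== Notes on version B (the rewrite author's own statement) =====
-- stated objective: faster
-- what changed: Replaced the position-major nested scan (for each index, try every substring via equals_at_casefold slicing and re-casefolding) by a substring-major reduction: casefold the haystack once, take each substring's earliest str.find position, and keep a running minimum (-1 if none matched); the validation pre-pass (None check, return 0 on empty substring) is kept.
import Mathlib
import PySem

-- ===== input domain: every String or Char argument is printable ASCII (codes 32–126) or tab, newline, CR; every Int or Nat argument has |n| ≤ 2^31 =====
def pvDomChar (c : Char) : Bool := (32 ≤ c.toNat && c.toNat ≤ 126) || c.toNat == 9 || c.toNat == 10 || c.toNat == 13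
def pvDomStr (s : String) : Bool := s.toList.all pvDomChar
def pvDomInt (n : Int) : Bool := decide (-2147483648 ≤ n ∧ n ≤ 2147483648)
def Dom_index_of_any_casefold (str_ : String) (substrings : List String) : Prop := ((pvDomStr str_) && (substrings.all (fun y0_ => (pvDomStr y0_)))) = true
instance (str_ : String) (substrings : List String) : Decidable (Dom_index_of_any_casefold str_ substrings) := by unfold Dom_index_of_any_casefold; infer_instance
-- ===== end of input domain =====

-- B replaces A's position-major nested scan by per-substring earliest-find positions reduced by a
-- running minimum (alternative decomposition, same exact result). Python's str.casefold is ported as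
-- PySem.Chars.lower: on the ASCII domain Dom_ casefold and lower coincide character by character.
-- A's 'substring is None' check is unrepresentable for List String and is omitted in both ports.

-- ===== PORT A =====
-- helper equals_at_casefold: none = the RuntimeError branches (never reached from the call sites below)
def equalsAtCasefold (s : List Char) (index : Int) (sub : List Char) : Option Bool :=
  let strLength : Int := s.length
  let substringLength : Int := sub.length
  if index < 0 then none
  else if 0 < substringLength then
    if strLength ≤ index then none
    else if strLength < index + substringLength then some false
    else some (PySem.Chars.lower (PySem.List.slice s (some index) (some (index + substringLength)))
               == PySem.Chars.lower sub)
  else if strLength < index then none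
  else some true

-- A's first loop: 'for substring in substrings: if substring == "": return 0'
def emptyPrepassA : List String → Bool
  | [] => false
  | substring :: rest => if substring == "" then true else emptyPrepassA rest

-- A's nested loops: 'for index in range(str_length): for substring in substrings: if equals: return index'
def scanLoopA (s : List Char) (substrings : List String) : List Int → Int
  | [] => -1
  | index :: rest =>
    if substrings.any (fun sub => equalsAtCasefold s index sub.toList == some true) then index
    else scanLoopA s substrings rest

def index_of_any_casefold (str_ : String) (substrings : List String) : Int :=
  let s := str_.toList
  let strLength := s.length
  if emptyPrepassA substrings then 0
  else scanLoopA s substrings (PySem.List.pyRange 0 strLength 1)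

-- ===== PORT B =====
-- B's pre-pass loop (same validation loop as A's, kept by design)
def emptyPrepassB : List String → Bool
  | [] => false
  | substring :: rest => if substring == "" then true else emptyPrepassB rest

-- one step of B's running-minimum loop over substrings
def bestStepB (folded : List Char) (best : Int) (substring : String) : Int :=
  let found := PySem.Chars.find folded (PySem.Chars.lower substring.toList)
  if 0 ≤ found ∧ (best = -1 ∨ found < best) then found else best

def index_of_any_casefold_alt (str_ : String) (substrings : List String) : Int :=
  if emptyPrepassB substrings then 0
  else
    let folded := PySem.Chars.lower str_.toList
    substrings.foldl (bestStepB folded) (-1)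

-- ===== PRECONDITION & SPEC =====
def Spec_index_of_any_casefold (str_ : String) (substrings : List String) (out : Int) : Prop := out = index_of_any_casefold_alt str_ substrings
instance (str_ : String) (substrings : List String) (out : Int) : Decidable (Spec_index_of_any_casefold str_ substrings out) := by unfold Spec_index_of_any_casefold; infer_instance

-- ===== CLAIM (what is proved, stated in full; the proofs are below) =====
def Claim_equal_index_of_any_casefold : Prop := ∀ (str_ : String) (substrings : List String), Dom_index_of_any_casefold str_ substrings → Spec_index_of_any_casefold str_ substrings (index_of_any_casefold str_ substrings)

-- ===== LEMMAS AND PROOFS =====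

-- a substring (already lowered) matches at position j of the lowered haystack
def MatchAt (lf : List Char) (substrings : List String) (j : Nat) : Prop :=
  ∃ sub ∈ substrings, PySem.Chars.lower sub.toList <+: lf.drop j

-- the common characterisation: r is the least matching position, or -1 when none matches
def GoodRes (lf : List Char) (substrings : List String) (r : Int) : Prop :=
  (0 ≤ r ∧ MatchAt lf substrings r.toNat ∧ ∀ j < r.toNat, ¬ MatchAt lf substrings j)
  ∨ (r = -1 ∧ ∀ j, ¬ MatchAt lf substrings j)

theorem goodRes_unique (lf : List Char) (subs : List String) (r₁ r₂ : Int)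
    (h₁ : GoodRes lf subs r₁) (h₂ : GoodRes lf subs r₂) : r₁ = r₂ := by
  rcases h₁ with ⟨hr₁, hm₁, hmin₁⟩ | ⟨he₁, hno₁⟩ <;>
    rcases h₂ with ⟨hr₂, hm₂, hmin₂⟩ | ⟨he₂, hno₂⟩
  · have l₁ : ¬ r₁.toNat < r₂.toNat := fun h => hmin₂ _ h hm₁
    have l₂ : ¬ r₂.toNat < r₁.toNat := fun h => hmin₁ _ h hm₂
    omega
  · exact absurd hm₁ (hno₂ _)
  · exact absurd hm₂ (hno₁ _)
  · omega

theorem emptyPrepass_eq : ∀ subs : List String, emptyPrepassA subs = emptyPrepassB subs := by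
  intro subs
  induction subs with
  | nil => rfl
  | cons s rest ih => simp [emptyPrepassA, emptyPrepassB, ih]

theorem emptyPrepassA_false {subs : List String} (h : emptyPrepassA subs = false) :
    ∀ sub ∈ subs, sub ≠ "" := by
  induction subs with
  | nil => simp
  | cons s rest ih =>
    simp only [emptyPrepassA] at h
    by_cases hs : s == ""
    · simp [hs] at h
    · intro sub hmem
      rw [List.mem_cons] at hmem
      rcases hmem with rfl | hmem
      · simpa using hs
      · exact ih (by simpa [hs] using h) _ hmem

theorem lower_ne_nil {sub : String} (h : sub ≠ "") : PySem.Chars.lower sub.toList ≠ [] := by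
  have : sub.toList ≠ [] := fun hc => h (String.toList_eq_nil_iff.mp hc)
  simpa [PySem.Chars.lower] using this

theorem matchAt_lt_length {lf : List Char} {subs : List String} {j : Nat}
    (hne : ∀ sub ∈ subs, sub ≠ "") (h : MatchAt lf subs j) : j < lf.length := by
  rcases h with ⟨sub, hmem, hpre⟩
  by_contra hj
  have : lf.drop j = [] := List.drop_eq_nil_of_le (by omega)
  rw [this] at hpre
  exact lower_ne_nil (hne sub hmem) (List.prefix_nil.mp hpre)

-- A's helper, at an in-range natural index and a nonempty substring, decides prefix matching
theorem equalsAt_char (s : List Char) (k : Nat) (sub : String) (hk : k < s.length) (hsub : sub ≠ "") :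
    (equalsAtCasefold s (k : Int) sub.toList = some true)
      ↔ PySem.Chars.lower sub.toList <+: (PySem.Chars.lower s).drop k := by
  have hlen : (0 : Int) < sub.toList.length := by
    have : sub.toList ≠ [] := fun hc => hsub (String.toList_eq_nil_iff.mp hc)
    have : 0 < sub.toList.length := List.length_pos_of_ne_nil this
    exact_mod_cast this
  simp only [equalsAtCasefold]
  rw [if_neg (by omega), if_pos hlen, if_neg (by omega)]
  by_cases hfit : (s.length : Int) < (k : Int) + (sub.toList.length : Int)
  · rw [if_pos hfit]
    constructor
    · intro h; simp at h
    · intro hpre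
      exfalso
      have hl := hpre.length_le
      simp only [PySem.Chars.lower, List.length_map, List.length_drop] at hl
      omega
  · rw [if_neg hfit]
    rw [PySem.List.slice_natCast_add s k sub.toList.length]
    constructor
    · intro h
      have heq : PySem.Chars.lower (List.take sub.toList.length (List.drop k s))
          = PySem.Chars.lower sub.toList := by
        have := Option.some.inj h
        exact beq_iff_eq.mp this
      rw [List.prefix_iff_eq_take]
      rw [← heq]
      simp [PySem.Chars.lower, List.map_take, List.map_drop]
    · intro hpre
      have hpre' := List.prefix_iff_eq_take.mp hpre
      have hlenl : (PySem.Chars.lower sub.toList).length = sub.toList.length := by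
        simp [PySem.Chars.lower]
      rw [hlenl] at hpre'
      simp only [Option.some.injEq, beq_iff_eq]
      rw [show PySem.Chars.lower (List.take sub.toList.length (List.drop k s))
            = List.take sub.toList.length (List.drop k (PySem.Chars.lower s)) by
          simp [PySem.Chars.lower, List.map_take, List.map_drop]]
      exact hpre'.symm

-- A's scan loop is a first-match search over its index list
theorem scanLoopA_eq_find? (s : List Char) (subs : List String) (l : List Int) :
    scanLoopA s subs l
      = (l.find? (fun i => subs.any (fun sub => equalsAtCasefold s i sub.toList == some true))).getD (-1) := by
  induction l with
  | nil => rfl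
  | cons i rest ih =>
    by_cases h : subs.any (fun sub => equalsAtCasefold s i sub.toList == some true)
    · simp [scanLoopA, List.find?, h]
    · simp only [scanLoopA, List.find?]
      rw [if_neg (by simpa using h)]
      simpa [h] using ih

-- the first match over range n is GoodRes, assuming all substrings nonempty
theorem scanA_good (s : List Char) (subs : List String) (hne : ∀ sub ∈ subs, sub ≠ "") :
    GoodRes (PySem.Chars.lower s) subs (scanLoopA s subs (PySem.List.pyRange 0 (s.length : Int) 1)) := by
  have hlen : (PySem.Chars.lower s).length = s.length := by simp [PySem.Chars.lower]
  have hrange : PySem.List.pyRange 0 (s.length : Int) 1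
      = List.map (fun k : Nat => (k : Int)) (List.range s.length) := by
    simpa using PySem.List.pyRange_zero_natCast s.length
  rw [scanLoopA_eq_find?, hrange, List.find?_map]
  set q : Nat → Bool :=
    ((fun i : Int => subs.any fun sub => equalsAtCasefold s i sub.toList == some true)
      ∘ fun k : Nat => (k : Int)) with hq
  have hqM : ∀ k, k < s.length → (q k = true ↔ MatchAt (PySem.Chars.lower s) subs k) := by
    intro k hk
    simp only [hq, Function.comp, List.any_eq_true, MatchAt]
    constructor
    · rintro ⟨sub, hmem, hbeq⟩
      exact ⟨sub, hmem, (equalsAt_char s k sub hk (hne sub hmem)).mp (by simpa using hbeq)⟩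
    · rintro ⟨sub, hmem, hpre⟩
      exact ⟨sub, hmem, by simpa using (equalsAt_char s k sub hk (hne sub hmem)).mpr hpre⟩
  rcases hfind : (List.range s.length).find? q with _ | k
  · right
    refine ⟨by simp, fun j hM => ?_⟩
    have hj : j < s.length := hlen ▸ matchAt_lt_length hne hM
    have := List.find?_eq_none.mp hfind j (List.mem_range.mpr hj)
    exact this ((hqM j hj).mpr hM)
  · rw [show (Option.map (fun k : Nat => (k : Int)) (some k)).getD (-1) = (k : Int) from rfl]
    left
    obtain ⟨hqk, i, hi, hget, hbefore⟩ := List.find?_eq_some_iff_getElem.mp hfind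
    simp only [List.getElem_range] at hget hbefore
    subst hget
    have hki : i < s.length := by simpa using hi
    refine ⟨by simp, ?_, ?_⟩
    · simpa using (hqM i hki).mp hqk
    · intro j hj hM
      have hjk : j < i := by simpa using hj
      have hjs : j < s.length := by omega
      have hfj := hbefore j hjk
      exact absurd ((hqM j hjs).mpr hM) (by simpa using hfj)

-- B's fold is a running minimum of the per-substring find positions
theorem foldB_props (lf : List Char) :
    ∀ (subs : List String) (best : Int), best = -1 ∨ 0 ≤ best →
    (subs.foldl (bestStepB lf) best = best
      ∨ ∃ sub ∈ subs, 0 ≤ PySem.Chars.find lf (PySem.Chars.lower sub.toList)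
          ∧ subs.foldl (bestStepB lf) best = PySem.Chars.find lf (PySem.Chars.lower sub.toList))
    ∧ (0 ≤ best → subs.foldl (bestStepB lf) best ≤ best)
    ∧ (∀ sub ∈ subs, 0 ≤ PySem.Chars.find lf (PySem.Chars.lower sub.toList) →
        0 ≤ subs.foldl (bestStepB lf) best
          ∧ subs.foldl (bestStepB lf) best ≤ PySem.Chars.find lf (PySem.Chars.lower sub.toList)) := by
  intro subs
  induction subs with
  | nil => intro best _; exact ⟨Or.inl rfl, fun _ => le_refl _, by simp⟩
  | cons s rest ih =>
    intro best hbest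
    set f := PySem.Chars.find lf (PySem.Chars.lower s.toList) with hf
    have hstep : List.foldl (bestStepB lf) best (s :: rest)
        = List.foldl (bestStepB lf) (bestStepB lf best s) rest := by simp
    set best' := bestStepB lf best s with hb'
    have hb'cases : (best' = f ∧ 0 ≤ f) ∨ best' = best := by
      simp only [hb', bestStepB]
      split_ifs with h
      · exact Or.inl ⟨rfl, h.1⟩
      · exact Or.inr rfl
    have hb'ok : best' = -1 ∨ 0 ≤ best' := by rcases hb'cases with ⟨h1, h2⟩ | h1 <;> omega
    obtain ⟨ih1, ih2, ih3⟩ := ih best' hb'ok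
    rw [hstep]
    refine ⟨?_, ?_, ?_⟩
    · rcases ih1 with h | ⟨sub, hmem, hge, heq⟩
      · rcases hb'cases with ⟨h1, h2⟩ | h1
        · exact Or.inr ⟨s, by simp, by rw [← hf]; exact h2, by rw [h, h1, hf]⟩
        · exact Or.inl (by rw [h, h1])
      · exact Or.inr ⟨sub, by simp [hmem], hge, heq⟩
    · intro hb0
      have hle : best' ≤ best := by
        simp only [hb', bestStepB]; split_ifs with h
        · rcases h.2 with h2 | h2 <;> omega
        · exact le_refl _
      have : 0 ≤ best' ∨ best' = -1 := hb'ok.symm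
      rcases hb'ok with h | h
      · -- best' = -1: impossible when 0 ≤ best, since best' = f < 0 or best' = best
        rcases hb'cases with ⟨h1, h2⟩ | h1
        · omega
        · omega
      · exact le_trans (ih2 h) hle
    · intro sub hmem hge
      rw [List.mem_cons] at hmem
      rcases hmem with rfl | hmem
      · -- sub = s: best' ≤ f by the step, and rest keeps the value ≤ best'
        have hb'f : 0 ≤ best' ∧ best' ≤ f := by
          simp only [hb', bestStepB, ← hf]
          split_ifs with h
          · exact ⟨by rw [← hf] at hge; omega, le_refl _⟩
          · rw [← hf] at hge
            push Not at h
            rcases hbest with hb | hb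
            · exact absurd hb (by intro hc; exact absurd (h hge).1 (by omega))
            · exact ⟨hb, (h hge).2⟩
        refine ⟨?_, le_trans (ih2 hb'f.1) hb'f.2⟩
        rcases ih1 with h | ⟨sub', _, hge', heq⟩
        · omega
        · omega
      · exact ih3 sub hmem hge

theorem foldB_good (lf : List Char) (subs : List String) :
    GoodRes lf subs (subs.foldl (bestStepB lf) (-1)) := by
  obtain ⟨h1, _, h3⟩ := foldB_props lf subs (-1) (Or.inl rfl)
  set r := subs.foldl (bestStepB lf) (-1) with hr
  by_cases hr0 : 0 ≤ r
  · left
    rcases h1 with h | ⟨sub, hmem, hge, heq⟩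
    · omega
    · have hspec := PySem.Chars.find_spec (sub := PySem.Chars.lower sub.toList) hge
      refine ⟨hr0, ⟨sub, hmem, by rw [heq]; exact hspec.1⟩, ?_⟩
      intro j hj hM
      rcases hM with ⟨sub', hmem', hpre'⟩
      have hinf : PySem.Chars.lower sub'.toList <:+: lf :=
        hpre'.isInfix.trans (List.drop_suffix j lf).isInfix
      have hge' : 0 ≤ PySem.Chars.find lf (PySem.Chars.lower sub'.toList) := by
        have := PySem.Chars.neg_one_le_find lf (PySem.Chars.lower sub'.toList)
        have hne1 : PySem.Chars.find lf (PySem.Chars.lower sub'.toList) ≠ -1 :=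
          fun hc => (PySem.Chars.find_eq_neg_one_iff _ _).mp hc hinf
        omega
      have hrle := (h3 sub' hmem' hge').2
      have hspec' := PySem.Chars.find_spec (sub := PySem.Chars.lower sub'.toList) hge'
      exact hspec'.2 j (by omega) hpre'
  · right
    have hrm1 : r = -1 := by
      rcases h1 with h | ⟨sub, hmem, hge, heq⟩
      · exact h
      · omega
    refine ⟨hrm1, fun j hM => ?_⟩
    rcases hM with ⟨sub', hmem', hpre'⟩
    have hinf : PySem.Chars.lower sub'.toList <:+: lf :=
      hpre'.isInfix.trans (List.drop_suffix j lf).isInfix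
    have hge' : 0 ≤ PySem.Chars.find lf (PySem.Chars.lower sub'.toList) := by
      have := PySem.Chars.neg_one_le_find lf (PySem.Chars.lower sub'.toList)
      have hne1 : PySem.Chars.find lf (PySem.Chars.lower sub'.toList) ≠ -1 :=
        fun hc => (PySem.Chars.find_eq_neg_one_iff _ _).mp hc hinf
      omega
    exact hr0 (h3 sub' hmem' hge').1

-- ===== VERDICT (by name: the statement is the Claim_ definition above) =====
theorem index_of_any_casefold_spec : Claim_equal_index_of_any_casefold := by
  intro str_ substrings _dom
  unfold Spec_index_of_any_casefold index_of_any_casefold index_of_any_casefold_alt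
  rw [← emptyPrepass_eq]
  by_cases h : emptyPrepassA substrings = true
  · simp [h]
  · have hfalse : emptyPrepassA substrings = false := by simpa using h
    have hne := emptyPrepassA_false hfalse
    simp only [hfalse, Bool.false_eq_true, if_false]
    exact goodRes_unique (PySem.Chars.lower str_.toList) substrings _ _
      (scanA_good str_.toList substrings hne) (foldB_good (PySem.Chars.lower str_.toList) substrings)
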